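-- pv_equiv track=rewrite | github.com/VLAntoine/grille_montagne | utils.py | get_nombre_sommets_visibles
-- ===== SOURCE A (Python) =====
-- def get_nombre_sommets_visibles(liste):
--     """
--     Retourne le nombre de sommets visibles de la liste en entrée à l'exclusion des zéros.
--     [0,3,1,0,4] -> 2
--     """
--     max_hauteur = 0
--     nb_sommets = 0
--     for nombre in liste:
--         if nombre > max_hauteur:
--             max_hauteur = nombre
--             nb_sommets += 1
--     return nb_sommets
-- ===== SOURCE B (Python) =====
-- def get_nombre_sommets_visibles(liste):
--     # Sort the positive heights tallest-first (ties: leftmost first), then count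
--     # the pairs whose position is a new left-to-right minimum: a peak is visible
--     # iff every taller-or-equal peak stands strictly to its right.
--     pairs = [(v, i) for i, v in enumerate(liste) if v > 0]
--     pairs.sort(key=lambda p: (-p[0], p[1]))
--     best = len(liste)
--     nb = 0
--     for _, i in pairs:
--         if i < best:
--             best = i
--             nb += 1
--     return nb
-- ===== Notes on version B (the rewrite author's own statement) =====
-- stated objective: alternative
-- what changed: B replaces A's single running-maximum loop by a sort-then-scan algorithm: it pairs each positive height with its position, sorts tallest-first (ties leftmost-first), and counts the pairs whose position is a new left-to-right minimum, i.e. peaks with no taller-or-equal peak to their left.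
import Mathlib
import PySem

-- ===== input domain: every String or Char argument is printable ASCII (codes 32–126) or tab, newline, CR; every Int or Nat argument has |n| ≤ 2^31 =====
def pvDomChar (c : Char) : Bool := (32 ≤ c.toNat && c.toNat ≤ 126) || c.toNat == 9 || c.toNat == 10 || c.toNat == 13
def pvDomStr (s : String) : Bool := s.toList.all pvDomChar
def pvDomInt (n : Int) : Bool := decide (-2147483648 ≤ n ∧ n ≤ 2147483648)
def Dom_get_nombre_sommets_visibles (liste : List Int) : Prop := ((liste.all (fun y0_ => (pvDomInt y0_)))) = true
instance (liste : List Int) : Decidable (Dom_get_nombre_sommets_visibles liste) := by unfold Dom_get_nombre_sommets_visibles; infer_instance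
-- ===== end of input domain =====

-- B replaces A's running-maximum loop by sort-then-scan: sort positive heights tallest-first
-- (ties leftmost-first) and count left-to-right minima of the positions (alternative algorithm).

-- ===== PORT A =====
-- literal port of A: one loop carrying (max_hauteur, nb_sommets)
def get_nombre_sommets_visibles (liste : List Int) : Int :=
  (liste.foldl (fun (st : Int × Int) nombre =>
      if nombre > st.1 then (nombre, st.2 + 1) else st) (0, 0)).2

-- ===== PORT B =====
-- literal port of B: build (height, position) pairs of the positive heights,
-- sort by key (-height, position), count positions that are new left-to-right minima
def get_nombre_sommets_visibles_alt (liste : List Int) : Int :=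
  let pairs := (PySem.List.enumerate liste).filterMap
      (fun q => if q.2 > 0 then some (q.2, q.1) else none)
  let s := PySem.List.sorted2 pairs (fun p => -p.1) (fun p => p.2)
  (s.foldl (fun (st : Int × Int) p =>
      if p.2 < st.1 then (p.2, st.2 + 1) else st) ((liste.length : Int), 0)).2

-- ===== PRECONDITION & SPEC =====
def Spec_get_nombre_sommets_visibles (liste : List Int) (out : Int) : Prop := out = get_nombre_sommets_visibles_alt liste
instance (liste : List Int) (out : Int) : Decidable (Spec_get_nombre_sommets_visibles liste out) := by unfold Spec_get_nombre_sommets_visibles; infer_instance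

-- ===== CLAIM (what is proved, stated in full; the proofs are below) =====
def Claim_equal_get_nombre_sommets_visibles : Prop := ∀ (liste : List Int), Dom_get_nombre_sommets_visibles liste → Spec_get_nombre_sommets_visibles liste (get_nombre_sommets_visibles liste)

-- ===== LEMMAS AND PROOFS =====

-- A's loop as a structural recursion on the list with running threshold m
def pvRecCnt (m : Int) : List Int → Int
  | [] => 0
  | x :: t => if m < x then 1 + pvRecCnt x t else pvRecCnt m t

-- B's pair list, named for the proofs
def pvPairs (l : List Int) : List (Int × Int) :=
  (PySem.List.enumerate l).filterMap (fun q => if q.2 > 0 then some (q.2, q.1) else none)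

-- the comparator sorted2 uses for key (-height, position), and the order it produces
def pvBefore (a b : Int × Int) : Bool :=
  decide (-a.1 < -b.1) || (!decide (-b.1 < -a.1) && decide (a.2 < b.2))

def pvLE (a b : Int × Int) : Prop := b.1 < a.1 ∨ (a.1 = b.1 ∧ a.2 ≤ b.2)

-- "p is a visible peak of l": positive, and strictly taller than everything to its left
def pvIsRec (l : List Int) (p : Int × Int) : Bool :=
  decide (0 < p.1) &&
    (PySem.List.enumerate l).all (fun q => !(decide (q.1 < p.2) && decide (p.1 ≤ q.2)))

lemma pv_foldA (l : List Int) (m c : Int) :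
    (l.foldl (fun (st : Int × Int) nombre =>
        if nombre > st.1 then (nombre, st.2 + 1) else st) (m, c)).2 = c + pvRecCnt m l := by
  induction l generalizing m c with
  | nil => simp [pvRecCnt]
  | cons x t ih =>
    simp only [List.foldl_cons, pvRecCnt]
    by_cases h : m < x
    · rw [if_pos (by simpa using h), if_pos h, ih]; ring
    · rw [if_neg (by simpa using h), if_neg h, ih]

lemma pv_recCnt_append (a b : List Int) (m : Int) :
    pvRecCnt m (a ++ b) = pvRecCnt m a + pvRecCnt (a.foldl max m) b := by
  induction a generalizing m with
  | nil => simp [pvRecCnt]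
  | cons x t ih =>
    simp only [List.cons_append, pvRecCnt, List.foldl_cons]
    by_cases h : m < x
    · have hx : max m x = x := by omega
      rw [if_pos h, if_pos h, ih, hx]; ring
    · have hx : max m x = m := by omega
      rw [if_neg h, if_neg h, ih, hx]

lemma pv_enum_append (a : List Int) (x : Int) (s : Int) :
    PySem.List.enumerate (a ++ [x]) s
      = PySem.List.enumerate a s ++ [((s + a.length : Int), x)] := by
  induction a generalizing s with
  | nil => simp [PySem.List.enumerate_cons, PySem.List.enumerate_nil]
  | cons y t ih =>
    simp only [List.cons_append, PySem.List.enumerate_cons, ih, List.length_cons]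
    have : s + 1 + (t.length : Int) = s + ((t.length : Int) + 1) := by ring
    rw [this]; push_cast; ring_nf

lemma pv_mem_enum {l : List Int} {s : Int} {q : Int × Int} (h : q ∈ PySem.List.enumerate l s) :
    ∃ j : Nat, ∃ hj : j < l.length, q = (s + j, l[j]) := by
  induction l generalizing s with
  | nil => simp [PySem.List.enumerate_nil] at h
  | cons y t ih =>
    rw [PySem.List.enumerate_cons] at h
    rcases List.mem_cons.mp h with h | h
    · exact ⟨0, by simp, by simpa using h⟩
    · obtain ⟨j, hj, hq⟩ := ih h
      exact ⟨j + 1, by simpa using hj, by simp [hq]; ring⟩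

lemma pv_enum_mem (l : List Int) (s : Int) (j : Nat) (hj : j < l.length) :
    ((s + j : Int), l[j]) ∈ PySem.List.enumerate l s := by
  induction l generalizing s j with
  | nil => simp at hj
  | cons y t ih =>
    rw [PySem.List.enumerate_cons]
    cases j with
    | zero => simp
    | succ k =>
      refine List.mem_cons_of_mem _ ?_
      have := ih (s + 1) k (by simpa using hj)
      simpa [add_assoc, add_comm, add_left_comm] using this

lemma pv_mem_pairs {l : List Int} {p : Int × Int} :
    p ∈ pvPairs l ↔ ∃ j : Nat, ∃ hj : j < l.length, p = (l[j], (j : Int)) ∧ 0 < l[j] := by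
  unfold pvPairs
  rw [List.mem_filterMap]
  constructor
  · rintro ⟨a, ha, hfa⟩
    obtain ⟨j, hj, rfl⟩ := pv_mem_enum ha
    by_cases h : l[j] > 0
    · refine ⟨j, hj, ?_, h⟩
      simp [h] at hfa
      simp [← hfa]
    · simp [h] at hfa
  · rintro ⟨j, hj, rfl, hpos⟩
    refine ⟨((j : Int), l[j]), ?_, by simp [hpos]⟩
    simpa using pv_enum_mem l 0 j hj

lemma pv_pairs_snd_ge (l : List Int) : ∀ (s : Int),
    ∀ q ∈ (PySem.List.enumerate l s).filterMap
        (fun q => if q.2 > 0 then some (q.2, q.1) else none), s ≤ q.2 := by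
  induction l with
  | nil => intro s q hq; simp [PySem.List.enumerate_nil] at hq
  | cons y t ih =>
    intro s q hq
    rw [PySem.List.enumerate_cons, List.filterMap_cons] at hq
    by_cases h : y > 0
    · simp only [h, if_pos] at hq
      rcases List.mem_cons.mp hq with rfl | hq
      · simp
      · have := ih (s + 1) q hq; omega
    · simp only [if_neg h] at hq
      have := ih (s + 1) q hq; omega

lemma pv_pairs_snd_lt (l : List Int) : ∀ s : Int,
    ((PySem.List.enumerate l s).filterMap
        (fun q => if q.2 > 0 then some (q.2, q.1) else none)).Pairwise
      (fun a b => a.2 < b.2) := by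
  induction l with
  | nil => intro s; simp [PySem.List.enumerate_nil]
  | cons y t ih =>
    intro s
    rw [PySem.List.enumerate_cons, List.filterMap_cons]
    by_cases h : y > 0
    · simp only [h, if_pos]
      refine List.Pairwise.cons ?_ (ih (s + 1))
      intro q hq
      have := pv_pairs_snd_ge t (s + 1) q hq
      simp; omega
    · simp only [if_neg h]; exact ih (s + 1)

lemma pv_pairs_nodup (l : List Int) : (pvPairs l).Nodup := by
  exact (pv_pairs_snd_lt l 0).imp (fun h => by intro he; rw [he] at h; omega)

lemma pv_isRec_iff (l : List Int) (p : Int × Int) :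
    pvIsRec l p = true ↔
      0 < p.1 ∧ ∀ (j : Nat) (hj : j < l.length), (j : Int) < p.2 → l[j] < p.1 := by
  unfold pvIsRec
  simp only [Bool.and_eq_true, List.all_eq_true, decide_eq_true_eq, Bool.not_eq_eq_eq_not,
    Bool.not_true, Bool.and_eq_false_iff, decide_eq_false_iff_not, not_lt, not_le]
  constructor
  · rintro ⟨h0, hall⟩
    refine ⟨h0, fun j hj hlt => ?_⟩
    have := hall ((j : Int), l[j]) (by simpa using pv_enum_mem l 0 j hj)
    simp at this
    rcases this with h | h
    · omega
    · exact h
  · rintro ⟨h0, hall⟩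
    refine ⟨h0, fun q hq => ?_⟩
    obtain ⟨j, hj, rfl⟩ := pv_mem_enum hq
    simp only [zero_add] at *
    by_cases hlt : (j : Int) < p.2
    · right; exact hall j hj hlt
    · left; omega

lemma pv_before_iff (a b : Int × Int) :
    pvBefore a b = true ↔ b.1 < a.1 ∨ (a.1 = b.1 ∧ a.2 < b.2) := by
  simp [pvBefore]; omega

lemma pv_notBefore_iff (a b : Int × Int) : pvBefore b a = false ↔ pvLE a b := by
  simp [pvBefore, pvLE]; omega

lemma pv_insert_pw (x : Int × Int) (l : List (Int × Int)) (h : l.Pairwise pvLE) :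
    (PySem.List.insertBy pvBefore x l).Pairwise pvLE := by
  induction l with
  | nil => simp [PySem.List.insertBy]
  | cons y ys ih =>
    rw [List.pairwise_cons] at h
    obtain ⟨hy, hys⟩ := h
    rw [PySem.List.insertBy]
    by_cases hb : pvBefore x y = true
    · rw [if_pos hb]
      have hxy := (pv_before_iff x y).mp hb
      refine List.Pairwise.cons ?_ (List.Pairwise.cons hy hys)
      intro z hz
      rcases List.mem_cons.mp hz with rfl | hz
      · unfold pvLE; omega
      · have := hy z hz; unfold pvLE at *; omega
    · rw [if_neg hb]
      refine List.Pairwise.cons ?_ (ih hys)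
      intro z hz
      rcases (PySem.List.mem_insertBy _ _ _ _).mp hz with rfl | hz
      · exact (pv_notBefore_iff y z).mp (by simpa using hb)
      · exact hy z hz

lemma pv_sorted_pw (xs : List (Int × Int)) : ∀ acc : List (Int × Int), acc.Pairwise pvLE →
    (xs.foldl (fun acc x => PySem.List.insertBy pvBefore x acc) acc).Pairwise pvLE := by
  induction xs with
  | nil => intro acc h; simpa using h
  | cons x t ih =>
    intro acc h
    rw [List.foldl_cons]
    exact ih _ (pv_insert_pw x acc h)

lemma pv_sorted2_eq (xs : List (Int × Int)) :
    PySem.List.sorted2 xs (fun p => -p.1) (fun p => p.2)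
      = xs.foldl (fun acc x => PySem.List.insertBy pvBefore x acc) [] := rfl

lemma pv_scan (l : List Int) : ∀ (s done : List (Int × Int)) (c : Int),
    (done ++ s).Perm (pvPairs l) →
    (done ++ s).Pairwise pvLE →
    (s.foldl (fun (st : Int × Int) p => if p.2 < st.1 then (p.2, st.2 + 1) else st)
        ((done.map (fun q => q.2)).foldl min (l.length : Int), c)).2
      = c + (s.countP (pvIsRec l) : Int) := by
  intro s
  induction s with
  | nil => intro done c _ _; simp
  | cons p rest ih =>
    intro done c hperm hpw
    set best := ((done.map (fun q => q.2)).foldl min (l.length : Int)) with hbestdef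
    -- generic facts about best
    have hbest := PySem.List.foldl_min_le (done.map (fun q => q.2)) ((l.length : Int))
    have hbest_le : ∀ q ∈ done, best ≤ q.2 := by
      intro q hq
      exact hbest.2 q.2 (List.mem_map_of_mem hq)
    have hbest_mem : best = (l.length : Int) ∨ ∃ q ∈ done, q.2 = best := by
      rcases PySem.List.foldl_min_mem (done.map (fun q => q.2)) ((l.length : Int)) with h | h
      · exact Or.inl h
      · obtain ⟨q, hq, hq2⟩ := List.mem_map.mp h
        exact Or.inr ⟨q, hq, hq2⟩
    -- p is a pair of l
    have hpmem : p ∈ pvPairs l := hperm.mem_iff.mp (by simp)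
    obtain ⟨i, hi, hpe, hpos⟩ := pv_mem_pairs.mp hpmem
    have hnodup : (done ++ p :: rest).Nodup := hperm.nodup_iff.mpr (pv_pairs_nodup l)
    have hpnotdone : p ∉ done := by
      intro hc
      have := List.disjoint_of_nodup_append hnodup hc (by simp)
      exact this
    have hpw' := List.pairwise_append.mp hpw
    -- the crux: counted here iff visible peak
    have hp1 : p.1 = l[i] := by rw [hpe]
    have hp2 : p.2 = (i : Int) := by rw [hpe]
    have hkey : p.2 < best ↔ pvIsRec l p = true := by
      constructor
      · intro hlt
        rw [pv_isRec_iff]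
        refine ⟨by omega, ?_⟩
        intro j hj hjlt
        by_contra hge
        push Not at hge
        have hjpos : 0 < l[j] := by omega
        have hqmem : ((l[j], (j : Int)) : Int × Int) ∈ pvPairs l :=
          pv_mem_pairs.mpr ⟨j, hj, rfl, hjpos⟩
        have hqin : ((l[j], (j : Int)) : Int × Int) ∈ done ++ p :: rest := hperm.symm.mem_iff.mp hqmem
        set q : Int × Int := (l[j], (j : Int)) with hqdef
        have hq1 : q.1 = l[j] := by rw [hqdef]
        have hq2 : q.2 = (j : Int) := by rw [hqdef]
        have hqne : q ≠ p := by
          intro he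
          have : q.2 = p.2 := by rw [he]
          omega
        rcases List.mem_append.mp hqin with hq | hq
        · have := hbest_le q hq
          omega
        · rcases List.mem_cons.mp hq with he | hq
          · exact hqne he
          · have hle : pvLE p q := (List.pairwise_cons.mp hpw'.2.1).1 q hq
            unfold pvLE at hle
            omega
      · intro hrec
        rw [pv_isRec_iff] at hrec
        rcases hbest_mem with hb | ⟨q, hq, hqb⟩
        · rw [hb]; omega
        · have hqpair : q ∈ pvPairs l := hperm.mem_iff.mp (List.mem_append_left _ hq)
          obtain ⟨j, hj, hqe, hjpos⟩ := pv_mem_pairs.mp hqpair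
          have hq1 : q.1 = l[j] := by rw [hqe]
          have hq2 : q.2 = (j : Int) := by rw [hqe]
          have hqne : q ≠ p := fun he => hpnotdone (he ▸ hq)
          have hij : j ≠ i := by
            intro he; subst he; apply hqne; rw [hqe, hpe]
          have hle : pvLE q p := hpw'.2.2 q hq p (by simp)
          unfold pvLE at hle
          by_contra hge
          push Not at hge
          have hji : (j : Int) < (i : Int) := by omega
          have := hrec.2 j hj (by omega)
          omega
    by_cases hrec : pvIsRec l p = true
    · have hlt : p.2 < best := hkey.mpr hrec
      rw [List.foldl_cons, if_pos hlt]
      have hmin : p.2 = (((done ++ [p]).map (fun q => q.2)).foldl min (l.length : Int)) := by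
        rw [List.map_append, List.foldl_append]
        simp [← hbestdef]
        omega
      rw [hmin]
      rw [ih (done ++ [p]) (c + 1) (by simpa using hperm) (by simpa using hpw)]
      simp [hrec]
      ring
    · have hge : ¬ p.2 < best := fun h => hrec (hkey.mp h)
      rw [List.foldl_cons, if_neg hge]
      have hmin : best = (((done ++ [p]).map (fun q => q.2)).foldl min (l.length : Int)) := by
        rw [List.map_append, List.foldl_append]
        simp [← hbestdef]
        omega
      rw [hmin]
      rw [ih (done ++ [p]) c (by simpa using hperm) (by simpa using hpw)]
      simp [hrec]

lemma pv_count (l : List Int) : ((pvPairs l).countP (pvIsRec l) : Int) = pvRecCnt 0 l := by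
  induction l using List.reverseRecOn with
  | nil => simp [pvPairs, pvRecCnt, PySem.List.enumerate_nil]
  | append_singleton a x ih =>
    have hpairs : pvPairs (a ++ [x])
        = pvPairs a ++ (if 0 < x then [(x, (a.length : Int))] else []) := by
      unfold pvPairs
      rw [pv_enum_append, List.filterMap_append]
      congr 1
      by_cases h : 0 < x <;> simp [h]
    have hsame : ∀ p ∈ pvPairs a, pvIsRec (a ++ [x]) p = pvIsRec a p := by
      intro p hp
      obtain ⟨i, hi, hpe, hpos⟩ := pv_mem_pairs.mp hp
      have hp2 : p.2 = (i : Int) := by rw [hpe]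
      rcases Bool.eq_false_or_eq_true (pvIsRec a p) with h | h
      · rw [h]
        rw [pv_isRec_iff] at h
        rw [pv_isRec_iff]
        refine ⟨h.1, fun j hj hjlt => ?_⟩
        have hjlen : j < a.length := by omega
        rw [List.getElem_append_left hjlen]
        exact h.2 j hjlen hjlt
      · rw [h, ← Bool.not_eq_true]
        rw [← Bool.not_eq_true] at h
        intro hc
        apply h
        rw [pv_isRec_iff] at hc ⊢
        refine ⟨hc.1, fun j hj hjlt => ?_⟩
        have := hc.2 j (by simp; omega) hjlt
        rwa [List.getElem_append_left hj] at this
    have hM := PySem.List.le_foldl_max a 0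
    have hMmem := PySem.List.foldl_max_mem a 0
    have hnew : (if 0 < x then (if pvIsRec (a ++ [x]) (x, (a.length : Int)) then (1:Int) else 0) else 0)
        = if a.foldl max 0 < x then 1 else 0 := by
      by_cases hMx : a.foldl max 0 < x
      · rw [if_pos hMx, if_pos (by omega)]
        rw [if_pos ?_]
        rw [pv_isRec_iff]
        refine ⟨by omega, fun j hj hjlt => ?_⟩
        have hjlen : j < a.length := by simp at hjlt; omega
        rw [List.getElem_append_left hjlen]
        have := hM.2 a[j] (List.getElem_mem hjlen)
        omega
      · rw [if_neg hMx]
        by_cases hx : 0 < x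
        · rw [if_pos hx, if_neg ?_]
          rw [pv_isRec_iff]
          rintro ⟨-, hall⟩
          rcases hMmem with hM0 | hMin
          · omega
          · obtain ⟨j, hjlen, hje⟩ := List.mem_iff_getElem.mp hMin
            have := hall j (by simp; omega) (by simp; omega)
            rw [List.getElem_append_left hjlen] at this
            omega
        · rw [if_neg hx]
    rw [hpairs, List.countP_append, pv_recCnt_append]
    have hc1 : ((pvPairs a).countP (pvIsRec (a ++ [x])) : Int) = pvRecCnt 0 a := by
      rw [List.countP_congr (fun p hp => by rw [hsame p hp]), ih]
    have : pvRecCnt (a.foldl max 0) [x] = if a.foldl max 0 < x then 1 else 0 := by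
      simp [pvRecCnt]
    rw [this]
    rw [hnew.symm]
    by_cases hx : 0 < x
    · simp only [hx, if_pos]
      by_cases hr : pvIsRec (a ++ [x]) (x, (a.length : Int)) = true <;>
        simp [hr, hc1]
    · simp [hx, hc1]

-- ===== VERDICT =====
theorem get_nombre_sommets_visibles_spec : Claim_equal_get_nombre_sommets_visibles := by
  intro liste _
  unfold Spec_get_nombre_sommets_visibles get_nombre_sommets_visibles get_nombre_sommets_visibles_alt
  rw [pv_foldA]
  show (0 : Int) + pvRecCnt 0 liste =
    ((PySem.List.sorted2 (pvPairs liste) (fun p => -p.1) (fun p => p.2)).foldl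
      (fun (st : Int × Int) p => if p.2 < st.1 then (p.2, st.2 + 1) else st)
      ((liste.length : Int), 0)).2
  have hperm : (PySem.List.sorted2 (pvPairs liste) (fun p => -p.1) (fun p => p.2)).Perm (pvPairs liste) :=
    PySem.List.sorted2_perm _ _ _ _
  have h := pv_scan liste (PySem.List.sorted2 (pvPairs liste) (fun p => -p.1) (fun p => p.2)) [] 0
    (by simpa using hperm)
    (by rw [pv_sorted2_eq]; simpa using pv_sorted_pw (pvPairs liste) [] List.Pairwise.nil)
  simp only [List.map_nil, List.foldl_nil] at h
  rw [h, hperm.countP_eq, pv_count]
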